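-- pv_equiv track=rewrite | github.com/Scorpi000/QuantStudio | QuantStudio/FactorDataBase/FactorOperation.py | _QS_partitionSectionIDs
-- ===== SOURCE A (Python) =====
-- def _QS_partitionSectionIDs(section_ids):
--     SectionIdx = []# [([ID], [idx])]
--     for i, iIDs in enumerate(section_ids):
--         for jIDs, jIdx in SectionIdx:
--             if iIDs == jIDs:
--                 jIdx.append(i)
--                 break
--         else:
--             SectionIdx.append((iIDs, [i]))
--     return SectionIdx
-- ===== SOURCE B (Python) =====
-- def _QS_partitionSectionIDs(section_ids):
--     # Repeated partitioning by pivot: take the first remaining index's ID list,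
--     # emit all indices sharing it in one sweep, drop them, repeat.  No running
--     # table of groups is maintained and each group is closed when emitted.
--     pairs = list(enumerate(section_ids))
--     out = []
--     while pairs:
--         k = pairs[0][1]
--         out.append((k, [i for i, x in pairs if x == k]))
--         pairs = [(i, x) for i, x in pairs if x != k]
--     return out
-- ===== Notes on version B (the rewrite author's own statement) =====
-- stated objective: alternative
-- what changed: Replaces A's incremental grouping (scan the open groups for each element, append or create) with a pivot-partition worklist: repeatedly take the first remaining element's ID list, collect all matching indices in one comprehension, remove them, and repeat until the worklist is empty.
import Mathlib
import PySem

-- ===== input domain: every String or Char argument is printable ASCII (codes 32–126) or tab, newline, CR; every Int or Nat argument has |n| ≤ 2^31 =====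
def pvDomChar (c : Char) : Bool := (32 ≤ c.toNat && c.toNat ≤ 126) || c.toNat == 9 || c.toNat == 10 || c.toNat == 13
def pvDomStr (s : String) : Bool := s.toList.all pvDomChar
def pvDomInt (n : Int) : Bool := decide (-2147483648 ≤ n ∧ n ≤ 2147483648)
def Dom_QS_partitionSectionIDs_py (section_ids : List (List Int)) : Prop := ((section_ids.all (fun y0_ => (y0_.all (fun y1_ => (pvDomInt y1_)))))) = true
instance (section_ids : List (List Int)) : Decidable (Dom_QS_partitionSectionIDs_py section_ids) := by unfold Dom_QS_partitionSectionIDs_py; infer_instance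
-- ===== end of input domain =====

-- B replaces A's incremental grouping (scan open groups per element) with a
-- pivot-partition worklist: emit each group in one sweep, drop it, repeat
-- (objective: alternative).


-- ===== PORT A =====
-- A's inner for/else loop: append i to the FIRST entry whose ids equal `ids`;
-- `none` means no entry matched (the for/else fell through).
def qsFind (ids : List Int) (i : Int) :
    List (List Int × List Int) → Option (List (List Int × List Int))
  | [] => none
  | (j, jx) :: rest =>
    if ids = j then some ((j, jx ++ [i]) :: rest)
    else (qsFind ids i rest).map (fun r => (j, jx) :: r)

-- one iteration of A's outer loop (p = (i, iIDs))
def qsStepA (acc : List (List Int × List Int)) (p : Int × List Int) :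
    List (List Int × List Int) :=
  match qsFind p.2 p.1 acc with
  | some acc' => acc'
  | none => acc ++ [(p.2, [p.1])]

-- tuples (iIDs, idx) are rendered as two-element lists to fit the required return type
def QS_partitionSectionIDs_py (section_ids : List (List Int)) : List (List (List Int)) :=
  ((PySem.List.enumerate section_ids 0).foldl qsStepA []).map (fun p => [p.1, p.2])

-- ===== PORT B =====
-- B's while loop: pairs is the worklist, out the finished groups; each round
-- takes the first pair's key k, emits (k, indices with key k), keeps the rest.
def qsLoop (pairs : List (Int × List Int)) (out : List (List Int × List Int)) :
    List (List Int × List Int) :=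
  match pairs with
  | [] => out
  | (i, k) :: tl =>
    qsLoop (tl.filter (fun p => !(p.2 == k)))
      (out ++ [(k, (((i, k) :: tl).filter (fun p => p.2 == k)).map Prod.fst)])
termination_by pairs.length
decreasing_by
  simp only [List.length_cons, List.length_unattach]
  exact Nat.lt_succ_of_le ((List.length_filter_le _ _).trans (le_of_eq (List.length_attach (l := tl))))

def QS_partitionSectionIDs_py_alt (section_ids : List (List Int)) : List (List (List Int)) :=
  (qsLoop (PySem.List.enumerate section_ids 0) []).map (fun p => [p.1, p.2])

-- ===== PRECONDITION & SPEC =====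
def Spec_QS_partitionSectionIDs_py (section_ids : List (List Int)) (out : List (List (List Int))) : Prop := out = QS_partitionSectionIDs_py_alt section_ids
instance (section_ids : List (List Int)) (out : List (List (List Int))) : Decidable (Spec_QS_partitionSectionIDs_py section_ids out) := by unfold Spec_QS_partitionSectionIDs_py; infer_instance

-- ===== CLAIM (what is proved, stated in full; the proofs are below) =====
def Claim_equal_QS_partitionSectionIDs_py : Prop := ∀ (section_ids : List (List Int)), Dom_QS_partitionSectionIDs_py section_ids → Spec_QS_partitionSectionIDs_py section_ids (QS_partitionSectionIDs_py section_ids)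

-- ===== LEMMAS AND PROOFS =====

-- A's fold with a group (k, ix) at the head of its state: elements with key k
-- update that head (first match), every other element never touches it.
theorem foldl_stepA_cons (l : List (Int × List Int)) (k : List Int) (ix : List Int)
    (acc : List (List Int × List Int)) :
    l.foldl qsStepA ((k, ix) :: acc)
      = (k, ix ++ (l.filter (fun p => p.2 == k)).map Prod.fst)
          :: (l.filter (fun p => !(p.2 == k))).foldl qsStepA acc := by
  induction l generalizing ix acc with
  | nil => simp
  | cons p tl ih =>
    obtain ⟨i, kp⟩ := p
    by_cases h : kp = k
    · subst h
      have hs : qsStepA ((kp, ix) :: acc) (i, kp) = (kp, ix ++ [i]) :: acc := by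
        simp [qsStepA, qsFind]
      simp [hs, ih]
    · have hne : ¬ (kp == k) = true := by simpa using h
      have hq : qsStepA ((k, ix) :: acc) (i, kp) = (k, ix) :: qsStepA acc (i, kp) := by
        unfold qsStepA
        simp only [qsFind]
        rw [if_neg h]
        cases qsFind kp i acc <;> simp
      simp only [List.foldl_cons, hq, List.filter_cons]
      rw [ih]
      simp [hne]

-- the `out` accumulator of B's loop distributes over ++ (strong induction on
-- the worklist length, since the recursive call shrinks it by filtering)
theorem qsLoop_out_aux (n : Nat) : ∀ (pairs : List (Int × List Int)), pairs.length ≤ n →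
    ∀ out, qsLoop pairs out = out ++ qsLoop pairs [] := by
  induction n with
  | zero =>
    intro pairs h out
    rw [List.length_eq_zero_iff.mp (Nat.le_zero.mp h)]
    simp [qsLoop]
  | succ n ih =>
    intro pairs h out
    match pairs with
    | [] => simp [qsLoop]
    | (i, k) :: tl =>
      rw [qsLoop, qsLoop]
      have hlen : (tl.filter (fun p => !(p.2 == k))).length ≤ n :=
        (List.length_filter_le _ _).trans (by simpa using Nat.le_of_succ_le_succ h)
      rw [ih _ hlen, ih _ hlen ([] ++ [(k, _)])]
      simp

theorem qsLoop_out (pairs : List (Int × List Int)) (out : List (List Int × List Int)) :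
    qsLoop pairs out = out ++ qsLoop pairs [] :=
  qsLoop_out_aux pairs.length pairs le_rfl out

-- A's fold equals B's worklist loop: the head group of A's state collects
-- exactly the pivot's indices (foldl_stepA_cons), the rest recurses.
theorem fold_eq_loop_aux (n : Nat) : ∀ (l : List (Int × List Int)), l.length ≤ n →
    l.foldl qsStepA [] = qsLoop l [] := by
  induction n with
  | zero =>
    intro l h
    rw [List.length_eq_zero_iff.mp (Nat.le_zero.mp h)]
    simp [qsLoop]
  | succ n ih =>
    intro l h
    match l with
    | [] => simp [qsLoop]
    | (i, k) :: tl =>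
      have h0 : qsStepA [] (i, k) = [(k, [i])] := by simp [qsStepA, qsFind]
      have hlen : (tl.filter (fun p => !(p.2 == k))).length ≤ n :=
        (List.length_filter_le _ _).trans (by simpa using Nat.le_of_succ_le_succ h)
      rw [List.foldl_cons, h0, foldl_stepA_cons, ih _ hlen, qsLoop]
      conv_rhs => rw [qsLoop_out]
      simp

theorem fold_eq_loop (l : List (Int × List Int)) :
    l.foldl qsStepA [] = qsLoop l [] :=
  fold_eq_loop_aux l.length l le_rfl

-- ===== VERDICT (by name: the statement is the Claim_ definition above) =====
theorem QS_partitionSectionIDs_py_spec : Claim_equal_QS_partitionSectionIDs_py := by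
  intro s _
  unfold Spec_QS_partitionSectionIDs_py QS_partitionSectionIDs_py QS_partitionSectionIDs_py_alt
  rw [fold_eq_loop]
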